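-- pv_equiv track=rewrite | github.com/hakanco/python_practice | tuesday/homework.py | hw
-- ===== SOURCE A (Python) =====
-- def hw(start, n):
--     result = []
--     for i in range(start, start+n*2):
--         if i % 2 == 0:
--             result.append(i)
--         else:
--             continue
--     return result
-- ===== SOURCE B (Python) =====
-- def hw(start, n):
--     first_even = start if start % 2 == 0 else start + 1
--     return list(range(first_even, start + n * 2, 2))
-- ===== Notes on version B (the rewrite author's own statement) =====
-- stated objective: simpler
-- what changed: Replaces the scan-and-filter loop over all 2n integers with a direct step-2 range starting at the first even number at or after start.
import Mathlib
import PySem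

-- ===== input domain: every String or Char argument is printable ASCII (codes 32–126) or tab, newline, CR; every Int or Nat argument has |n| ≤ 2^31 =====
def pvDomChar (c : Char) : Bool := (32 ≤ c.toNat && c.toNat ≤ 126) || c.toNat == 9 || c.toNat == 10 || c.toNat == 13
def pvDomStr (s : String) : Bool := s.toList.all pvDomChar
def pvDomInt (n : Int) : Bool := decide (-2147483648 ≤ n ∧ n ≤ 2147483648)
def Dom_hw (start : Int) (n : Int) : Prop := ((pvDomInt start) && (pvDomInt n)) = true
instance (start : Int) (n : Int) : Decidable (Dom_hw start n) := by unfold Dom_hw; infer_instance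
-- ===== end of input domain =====

-- B replaces A's scan-and-filter of all 2n integers by a direct step-2 range from the first even number ≥ start (objective: simpler).

-- ===== PORT A =====
def hw (start : Int) (n : Int) : List Int :=
  (PySem.List.pyRange start (start + n * 2) 1).foldl
    (fun result i => if PySem.Int.mod i 2 = 0 then result ++ [i] else result) []

-- ===== PORT B =====
def hw_alt (start : Int) (n : Int) : List Int :=
  let first_even := if PySem.Int.mod start 2 = 0 then start else start + 1
  PySem.List.pyRange first_even (start + n * 2) 2

-- ===== PRECONDITION & SPEC =====
def Spec_hw (start : Int) (n : Int) (out : List Int) : Prop := out = hw_alt start n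
instance (start : Int) (n : Int) (out : List Int) : Decidable (Spec_hw start n out) := by unfold Spec_hw; infer_instance

-- ===== CLAIM (what is proved, stated in full; the proofs are below) =====
def Claim_equal_hw : Prop := ∀ (start : Int) (n : Int), Dom_hw start n → Spec_hw start n (hw start n)

-- ===== LEMMAS AND PROOFS =====

lemma pyRange_two_nil (a b : Int) (h : b ≤ a) : PySem.List.pyRange a b 2 = [] := by
  rw [PySem.List.pyRange_of_pos a b (by norm_num)]
  rw [if_neg (by omega)]
  simp

lemma pyRange_two_cons (a b : Int) (h : a < b) :
    PySem.List.pyRange a b 2 = a :: PySem.List.pyRange (a + 2) b 2 := by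
  rw [PySem.List.pyRange_of_pos a b (by norm_num),
      PySem.List.pyRange_of_pos (a + 2) b (by norm_num)]
  have hc : (if a < b then ((b - a + 2 - 1) / 2).toNat else 0)
      = (if a + 2 < b then ((b - (a + 2) + 2 - 1) / 2).toNat else 0) + 1 := by
    split_ifs <;> omega
  rw [hc, List.range_succ_eq_map, List.map_cons, List.map_map]
  refine congrArg₂ _ (by simp) ?_
  exact List.map_congr_left (fun k _ => by simp [Nat.succ_eq_add_one]; ring)

lemma hw_key (a b : Int) (acc : List Int) :
    (PySem.List.pyRange a b 1).foldl
      (fun result i => if PySem.Int.mod i 2 = 0 then result ++ [i] else result) acc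
    = acc ++ PySem.List.pyRange (if PySem.Int.mod a 2 = 0 then a else a + 1) b 2 := by
  rcases lt_or_ge a b with h | h
  · rw [PySem.List.pyRange_one_cons h, List.foldl_cons, hw_key (a + 1) b]
    by_cases h2 : a % 2 = 0
    · have e1 : PySem.Int.mod a 2 = 0 := by
        simp [PySem.Int.mod, Int.fmod_eq_emod, h2]
      have e2 : PySem.Int.mod (a + 1) 2 ≠ 0 := by
        simp [PySem.Int.mod, Int.fmod_eq_emod]; omega
      rw [if_pos e1, if_pos e1, if_neg e2, pyRange_two_cons a b h]
      have : a + 1 + 1 = a + 2 := by ring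
      rw [this]
      simp
    · have e1 : PySem.Int.mod a 2 ≠ 0 := by
        simp [PySem.Int.mod, Int.fmod_eq_emod]; omega
      have e2 : PySem.Int.mod (a + 1) 2 = 0 := by
        simp [PySem.Int.mod, Int.fmod_eq_emod]; omega
      rw [if_neg e1, if_neg e1, if_pos e2]
  · rw [PySem.List.pyRange_one_eq_nil h, List.foldl_nil,
        pyRange_two_nil _ b (by split_ifs <;> omega)]
    simp
termination_by (b - a).toNat
decreasing_by omega

-- ===== VERDICT (by name: the statement is the Claim_ definition above) =====
theorem hw_spec : Claim_equal_hw := by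
  intro start n _
  unfold Spec_hw hw hw_alt
  rw [hw_key]
  simp
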